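-- pv_equiv track=rewrite | github.com/aimclub/FEDOT | fedot/core/optimisers/populational_optimizer.py | child_dict
-- ===== SOURCE A (Python) =====
-- def child_dict(net: list):
--     res_dict = dict()
--     for e0, e1 in net:
--         if e1 in res_dict:
--             res_dict[e1].append(e0)
--         else:
--             res_dict[e1] = [e0]
--     return res_dict
-- ===== SOURCE B (Python) =====
-- def child_dict(net: list):
--     targets = list(dict.fromkeys(e1 for _, e1 in net))
--     return {t: [e0 for e0, e1 in net if e1 == t] for t in targets}
-- ===== Notes on version B (the rewrite author's own statement) =====
-- stated objective: alternative
-- what changed: Replaces the single-pass dict-accumulator grouping with a two-phase decomposition: first collect the distinct targets in first-appearance order, then build each group by an independent scan of the edge list.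
import Mathlib
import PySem

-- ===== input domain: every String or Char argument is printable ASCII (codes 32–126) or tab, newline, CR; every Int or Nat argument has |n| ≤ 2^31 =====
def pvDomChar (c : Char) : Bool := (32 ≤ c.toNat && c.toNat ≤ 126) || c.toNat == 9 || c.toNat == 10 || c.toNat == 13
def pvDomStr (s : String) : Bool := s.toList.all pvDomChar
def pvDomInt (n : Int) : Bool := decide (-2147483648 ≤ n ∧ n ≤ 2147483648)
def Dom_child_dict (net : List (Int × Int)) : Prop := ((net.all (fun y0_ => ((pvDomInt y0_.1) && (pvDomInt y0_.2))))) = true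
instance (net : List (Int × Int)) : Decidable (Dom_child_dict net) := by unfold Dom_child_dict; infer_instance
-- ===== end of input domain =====

-- B groups edges by target via a two-phase decomposition (distinct targets first, then one scan per target)
-- instead of A's one-pass dict accumulator; same return value, no speed claim.

-- ===== PORT A =====
def child_dict (net : List (Int × Int)) : List (Int × List Int) :=
  (net.foldl
    (fun d p =>
      if d.contains p.2 then d.modify p.2 [] (fun l => l ++ [p.1])
      else d.insert p.2 [p.1])
    PySem.Dict.empty).items

-- ===== PORT B =====
def child_dict_alt (net : List (Int × Int)) : List (Int × List Int) :=
  (PySem.List.dedup (net.map (fun p => p.2))).map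
    (fun t => (t, (net.filter (fun p => p.2 == t)).map (fun p => p.1)))

-- ===== PRECONDITION & SPEC =====
def Spec_child_dict (net : List (Int × Int)) (out : List (Int × List Int)) : Prop := out = child_dict_alt net
instance (net : List (Int × Int)) (out : List (Int × List Int)) : Decidable (Spec_child_dict net out) := by unfold Spec_child_dict; infer_instance

-- ===== CLAIM (what is proved, stated in full; the proofs are below) =====
def Claim_equal_child_dict : Prop := ∀ (net : List (Int × Int)), Dom_child_dict net → Spec_child_dict net (child_dict net)

-- ===== LEMMAS AND PROOFS =====

-- A's branch is exactly Dict.modify (which inserts the default-applied value on a fresh key).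
lemma step_eq_modify (d : PySem.Dict Int (List Int)) (p : Int × Int) :
    (if d.contains p.2 then d.modify p.2 [] (fun l => l ++ [p.1]) else d.insert p.2 [p.1])
      = d.modify p.2 [] (fun l => l ++ [p.1]) := by
  by_cases h : d.contains p.2
  · simp [h]
  · have hg : d.getD p.2 [] = [] := PySem.Dict.getD_of_not_contains d [] (by simpa using h)
    simp [PySem.Dict.modify, h, hg]

lemma child_dict_eq_modify_fold (net : List (Int × Int)) :
    child_dict net =
      ((net.map (fun p => (p.2, p.1))).foldl
        (fun d q => d.modify q.1 [] (fun l => l ++ [q.2])) PySem.Dict.empty).items := by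
  unfold child_dict
  rw [List.foldl_map]
  congr 1
  exact PySem.List.foldl_congr_mem _ _ _ _ (fun d p _ => step_eq_modify d p)

-- ===== VERDICT (by name: the statement is the Claim_ definition above) =====
theorem child_dict_spec : Claim_equal_child_dict := by
  intro net _
  show child_dict net = child_dict_alt net
  rw [child_dict_eq_modify_fold]
  set L := net.map (fun p => (p.2, p.1)) with hL
  have hnodup : ((L.foldl (fun d q => d.modify q.1 [] (fun l => l ++ [q.2])) PySem.Dict.empty).keys).Nodup := by
    exact PySem.Dict.nodup_keys_foldl_modify_key L (fun q => q.1) [] (fun _ q l => l ++ [q.2]) _ (by simp)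
  rw [PySem.Dict.items_eq_map_keys _ hnodup []]
  have hkeys : (L.foldl (fun d q => d.modify q.1 [] (fun l => l ++ [q.2])) PySem.Dict.empty).keys
      = PySem.List.dedup (net.map (fun p => p.2)) := by
    rw [PySem.Dict.keys_foldl_modify_key]
    simp [hL, PySem.Set.update_nil_left, List.map_map, Function.comp_def]
  rw [hkeys]
  unfold child_dict_alt
  apply List.map_congr_left
  intro k _
  have hget := PySem.Dict.getD_foldl_modify_append L PySem.Dict.empty k
  rw [hget]
  simp [hL, List.filter_map, List.map_map, Function.comp_def]
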